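-- pv_equiv track=rewrite | github.com/MoTodoka/FI20D-02_CO2-Daten | programm2.py | get_sensor_data_per_lesson
-- ===== SOURCE A (Python) =====
-- def get_sensor_data_per_lesson(sensor_data):
--     values_per_lesson = 90 * 6
--     values_per_pause = 20 * 6
--     lessons = [[]]
--     pause_timer = 0
--
--     for idx in range(len(sensor_data)):
--         if len(lessons[len(lessons) - 1]) < values_per_lesson:
--             lessons[len(lessons) - 1].append(sensor_data[idx])
--         else:
--             if pause_timer < values_per_pause - 1:
--                 pause_timer += 1
--             else:
--                 lessons.append([])
--                 pause_timer = 0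
--
--     return lessons
-- ===== SOURCE B (Python) =====
-- def get_sensor_data_per_lesson(sensor_data):
--     period = 90 * 6 + 20 * 6       # 540 lesson values + 120 pause values
--     values_per_lesson = 90 * 6
--     n = len(sensor_data)
--     lessons = [sensor_data[0:values_per_lesson]]
--     k = 1
--     while k * period <= n:
--         lessons.append(sensor_data[k * period : k * period + values_per_lesson])
--         k += 1
--     return lessons
-- ===== Notes on version B (the rewrite author's own statement) =====
-- stated objective: simpler
-- what changed: Replaces the element-by-element state machine (last-lesson fill counter plus pause timer) with direct slicing: lesson k is sensor_data[k*660 : k*660+540], emitted for k=0 and then while k*660 <= len(sensor_data).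
import Mathlib
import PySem

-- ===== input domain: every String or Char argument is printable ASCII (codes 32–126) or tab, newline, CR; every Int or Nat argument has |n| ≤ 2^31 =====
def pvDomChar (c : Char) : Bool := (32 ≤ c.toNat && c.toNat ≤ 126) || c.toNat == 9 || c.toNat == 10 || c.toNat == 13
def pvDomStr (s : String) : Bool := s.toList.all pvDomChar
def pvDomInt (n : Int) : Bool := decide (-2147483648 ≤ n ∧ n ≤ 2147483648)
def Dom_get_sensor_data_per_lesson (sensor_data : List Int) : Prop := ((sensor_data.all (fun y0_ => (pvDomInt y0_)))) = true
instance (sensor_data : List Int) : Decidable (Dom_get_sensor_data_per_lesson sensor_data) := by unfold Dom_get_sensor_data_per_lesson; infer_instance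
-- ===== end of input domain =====

-- B replaces A's per-element state machine (fill counter + pause timer) by direct
-- slicing of lesson k at [k*660, k*660+540); objective: simpler.

-- ===== PORT A =====
-- lessons[len(lessons)-1].append(x): append x to the last inner list
def pvAppendLast (ls : List (List Int)) (x : Int) : List (List Int) :=
  match ls with
  | [] => []
  | [l] => [l ++ [x]]
  | l :: t => l :: pvAppendLast t x

-- len(lessons[len(lessons)-1])
def pvLastLen (ls : List (List Int)) : Nat := (ls.getLast?.getD []).length

-- the body of A's for-loop (values_per_lesson = 540, values_per_pause = 120)
def pvStepA (s : List (List Int) × Int) (x : Int) : List (List Int) × Int :=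
  if pvLastLen s.1 < 540 then (pvAppendLast s.1 x, s.2)
  else if s.2 < 120 - 1 then (s.1, s.2 + 1)
  else (s.1 ++ [[]], 0)

def get_sensor_data_per_lesson (sensor_data : List Int) : List (List Int) :=
  (List.foldl pvStepA ([[]], 0) sensor_data).1

-- ===== PORT B =====
-- the while-loop of Source B: while k*660 <= n: append sensor_data[k*660 : k*660+540]
def pvAltLoop (xs : List Int) (n k : Nat) : List (List Int) :=
  if k * 660 ≤ n then
    PySem.List.slice xs (some ((k * 660 : Nat) : Int)) (some ((k * 660 + 540 : Nat) : Int))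
      :: pvAltLoop xs n (k + 1)
  else []
termination_by n + 660 - k * 660
decreasing_by omega

def get_sensor_data_per_lesson_alt (sensor_data : List Int) : List (List Int) :=
  PySem.List.slice sensor_data (some 0) (some 540) :: pvAltLoop sensor_data sensor_data.length 1

-- ===== PRECONDITION & SPEC =====
def Spec_get_sensor_data_per_lesson (sensor_data : List Int) (out : List (List Int)) : Prop := out = get_sensor_data_per_lesson_alt sensor_data
instance (sensor_data : List Int) (out : List (List Int)) : Decidable (Spec_get_sensor_data_per_lesson sensor_data out) := by unfold Spec_get_sensor_data_per_lesson; infer_instance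

-- ===== CLAIM (what is proved, stated in full; the proofs are below) =====
def Claim_equal_get_sensor_data_per_lesson : Prop := ∀ (sensor_data : List Int), Dom_get_sensor_data_per_lesson sensor_data → Spec_get_sensor_data_per_lesson sensor_data (get_sensor_data_per_lesson sensor_data)

-- ===== LEMMAS AND PROOFS =====

-- recursive characterisation both programs are reduced to: one period at a time
def pvR (xs : List Int) : List (List Int) :=
  if h : xs.length < 660 then [xs.take 540]
  else xs.take 540 :: pvR (xs.drop 660)
termination_by xs.length
decreasing_by simp; omega

theorem pvLastLen_concat (done : List (List Int)) (cur : List Int) :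
    pvLastLen (done ++ [cur]) = cur.length := by
  simp [pvLastLen]

theorem pvAppendLast_concat (done : List (List Int)) (cur : List Int) (x : Int) :
    pvAppendLast (done ++ [cur]) x = done ++ [cur ++ [x]] := by
  induction done with
  | nil => simp [pvAppendLast]
  | cons d ds ih =>
    cases ds with
    | nil => simp [pvAppendLast]
    | cons e es => simpa [pvAppendLast] using ih

-- filling phase: elements are appended to the last lesson until it reaches 540
theorem pv_fill (xs : List Int) : ∀ (done : List (List Int)) (cur : List Int) (pt : Int),
    cur.length < 540 →
    List.foldl pvStepA (done ++ [cur], pt) xs =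
      List.foldl pvStepA (done ++ [cur ++ xs.take (540 - cur.length)], pt)
        (xs.drop (540 - cur.length)) := by
  induction xs with
  | nil => intro done cur pt h; simp
  | cons x xs ih =>
    intro done cur pt h
    have hstep : pvStepA (done ++ [cur], pt) x = (done ++ [cur ++ [x]], pt) := by
      simp [pvStepA, pvLastLen_concat, h, pvAppendLast_concat]
    by_cases h1 : cur.length + 1 < 540
    · have := ih done (cur ++ [x]) pt (by simpa using h1)
      have htake : (x :: xs).take (540 - cur.length) = x :: xs.take (540 - (cur.length + 1)) := by
        have : 540 - cur.length = (540 - (cur.length + 1)) + 1 := by omega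
        simp [this]
      have hdrop : (x :: xs).drop (540 - cur.length) = xs.drop (540 - (cur.length + 1)) := by
        have : 540 - cur.length = (540 - (cur.length + 1)) + 1 := by omega
        simp [this]
      simp only [List.foldl_cons, hstep, htake, hdrop]
      simpa using this
    · have hc : cur.length = 539 := by omega
      have htake : (x :: xs).take (540 - cur.length) = [x] := by simp [hc]
      have hdrop : (x :: xs).drop (540 - cur.length) = xs := by simp [hc]
      simp [List.foldl_cons, hstep, htake, hdrop]

-- pause phase: with the last lesson full, j = 120 - pause_timer elements remain to be discarded
theorem pv_pause (xs : List Int) : ∀ (ls : List (List Int)) (j : Nat),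
    1 ≤ j → j ≤ 120 → ¬ pvLastLen ls < 540 →
    List.foldl pvStepA (ls, ((120 - j : Nat) : Int)) xs =
      (if xs.length < j then (ls, ((120 - j : Nat) : Int) + xs.length)
       else List.foldl pvStepA (ls ++ [[]], 0) (xs.drop j)) := by
  induction xs with
  | nil =>
    intro ls j h1 h2 hfull
    simp only [List.foldl_nil, List.length_nil]
    rw [if_pos (by omega)]
    simp
  | cons x xs ih =>
    intro ls j h1 h2 hfull
    by_cases hj : 1 < j
    · have hlt : ((120 - j : Nat) : Int) < 120 - 1 := by omega
      have hstep : pvStepA (ls, ((120 - j : Nat) : Int)) x = (ls, ((120 - (j - 1) : Nat) : Int)) := by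
        simp only [pvStepA, if_neg hfull, if_pos hlt]
        congr 1
        omega
      have := ih ls (j - 1) (by omega) (by omega) hfull
      have hdrop : (x :: xs).drop j = xs.drop (j - 1) := by
        have : j = (j - 1) + 1 := by omega
        rw [this]; simp
      simp only [List.foldl_cons, hstep, this, hdrop, List.length_cons]
      by_cases hlen : xs.length < j - 1
      · rw [if_pos hlen, if_pos (by omega)]
        congr 1
        push_cast; omega
      · rw [if_neg hlen, if_neg (by omega)]
    · have hj1 : j = 1 := by omega
      subst hj1
      have hstep : pvStepA (ls, ((120 - 1 : Nat) : Int)) x = (ls ++ [[]], 0) := by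
        simp [pvStepA, if_neg hfull]
      rw [List.foldl_cons, hstep, if_neg (by simp)]
      simp

-- A reduces to pvR, one 660-element period at a time
theorem pv_A_eq_R : ∀ (n : Nat) (xs : List Int) (done : List (List Int)), xs.length ≤ n →
    (List.foldl pvStepA (done ++ [[]], 0) xs).1 = done ++ pvR xs := by
  intro n
  induction n using Nat.strong_induction_on with
  | _ n IH =>
    intro xs done hlen
    have hfill := pv_fill xs done [] 0 (by simp)
    simp only [List.nil_append, List.length_nil, Nat.sub_zero] at hfill
    by_cases h540 : xs.length ≤ 540
    · have : xs.drop 540 = [] := by simp [List.drop_eq_nil_iff]; omega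
      rw [hfill, this]
      rw [pvR]
      simp [List.take_of_length_le h540, dif_pos (by omega : xs.length < 660)]
    · have hfull : ¬ pvLastLen (done ++ [xs.take 540]) < 540 := by
        rw [pvLastLen_concat]; simp; omega
      have hpause := pv_pause (xs.drop 540) (done ++ [xs.take 540]) 120 (by omega) (by omega) hfull
      simp only [show ((120 - 120 : Nat) : Int) = 0 by norm_num] at hpause
      rw [hfill, hpause]
      by_cases h660 : xs.length < 660
      · rw [if_pos (by simp; omega)]
        rw [pvR, dif_pos h660]
      · rw [if_neg (by simp; omega), List.drop_drop]
        have := IH (n - 660) (by omega) (xs.drop 660) (done ++ [xs.take 540]) (by simp; omega)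
        rw [show (120 + 540 : Nat) = 660 by norm_num, this]
        conv_rhs => rw [pvR]
        rw [dif_neg h660]
        simp

theorem pvAltLoop_eq (xs : List Int) (n k : Nat) :
    pvAltLoop xs n k =
      if k * 660 ≤ n then (xs.drop (k * 660)).take 540 :: pvAltLoop xs n (k + 1) else [] := by
  rw [pvAltLoop]
  split_ifs with h
  · rw [PySem.List.slice_natCast]
    simp
  · rfl

-- shifting the slice loop by one period
set_option maxRecDepth 4000 in
theorem pv_shift : ∀ (m : Nat) (xs : List Int) (n k : Nat), 660 ≤ n → n - k * 660 ≤ m →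
    pvAltLoop xs n (k + 1) = pvAltLoop (xs.drop 660) (n - 660) k := by
  intro m
  induction m with
  | zero =>
    intro xs n k h660 hm
    rw [pvAltLoop_eq xs n (k + 1), pvAltLoop_eq (xs.drop 660) (n - 660) k]
    rw [if_neg (by omega), if_neg (by omega)]
  | succ m ih =>
    intro xs n k h660 hm
    rw [pvAltLoop_eq xs n (k + 1), pvAltLoop_eq (xs.drop 660) (n - 660) k]
    by_cases h : (k + 1) * 660 ≤ n
    · rw [if_pos h, if_pos (by omega)]
      rw [ih xs n (k + 1) h660 (by omega), List.drop_drop]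
      have he : (k + 1) * 660 = k * 660 + 660 := by ring
      rw [he, Nat.add_comm 660 (k * 660)]
    · rw [if_neg h, if_neg (by omega)]

theorem pv_slice0 (xs : List Int) :
    PySem.List.slice xs (some 0) (some 540) = xs.take 540 := by
  rw [show (0 : Int) = ((0 : Nat) : Int) by norm_num,
      show (540 : Int) = ((540 : Nat) : Int) by norm_num,
      PySem.List.slice_natCast]
  simp

-- B computes pvR
set_option maxRecDepth 4000 in
theorem pv_B_eq_R : ∀ (n : Nat) (xs : List Int), xs.length ≤ n →
    get_sensor_data_per_lesson_alt xs = pvR xs := by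
  intro n
  induction n using Nat.strong_induction_on with
  | _ n IH =>
    intro xs hlen
    unfold get_sensor_data_per_lesson_alt
    rw [pv_slice0]
    by_cases h660 : xs.length < 660
    · rw [pvAltLoop_eq, if_neg (by omega), pvR, dif_pos h660]
    · have hs := pv_shift xs.length xs xs.length 0 (by omega) (by omega)
      simp only [Nat.zero_add] at hs
      rw [hs]
      have hrec : pvAltLoop (xs.drop 660) (xs.length - 660) 0 =
          get_sensor_data_per_lesson_alt (xs.drop 660) := by
        rw [pvAltLoop_eq, if_pos (by omega)]
        unfold get_sensor_data_per_lesson_alt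
        rw [pv_slice0]
        simp
      rw [hrec, IH (n - 660) (by omega) (xs.drop 660) (by simp; omega)]
      conv_rhs => rw [pvR]
      rw [dif_neg h660]

-- ===== VERDICT (by name: the statement is the Claim_ definition above) =====
theorem get_sensor_data_per_lesson_spec : Claim_equal_get_sensor_data_per_lesson := by
  intro xs _
  unfold Spec_get_sensor_data_per_lesson get_sensor_data_per_lesson
  rw [pv_B_eq_R xs.length xs le_rfl]
  simpa using pv_A_eq_R xs.length xs [] le_rfl
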